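-- pv_equiv track=rewrite | github.com/vushnevskuu/push-talk | tools/obsidian-head-agent/scripts/obsidian_graph_tool.py | parse_exclude_prefixes
-- ===== SOURCE A (Python) =====
-- def parse_exclude_prefixes(values: list[str] | None) -> list[str]:
--     if not values:
--         return []
--     items: list[str] = []
--     for raw in values:
--         for part in raw.split(","):
--             cleaned = part.strip()
--             if cleaned:
--                 items.append(cleaned)
--     return items
-- ===== SOURCE B (Python) =====
-- def parse_exclude_prefixes(values: list[str] | None) -> list[str]:
--     if not values:
--         return []
--     items: list[str] = []
--     for raw in values:
--         token = ""    # current prefix, leading whitespace never entered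
--         pending = ""  # whitespace seen after token content, kept only if more content follows
--         for ch in raw:
--             if ch == ",":
--                 if token:
--                     items.append(token)
--                 token = ""
--                 pending = ""
--             elif ch.isspace():
--                 if token:
--                     pending += ch
--             else:
--                 token += pending + ch
--                 pending = ""
--         if token:
--             items.append(token)
--     return items
-- ===== Notes on version B (the rewrite author's own statement) =====
-- stated objective: alternative
-- what changed: B replaces A's split(",")-then-strip nested loops by a single character-level state machine that scans each string once, flushing the current token at commas and buffering inner whitespace in a pending accumulator, so no split or strip is ever called.
import Mathlib
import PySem

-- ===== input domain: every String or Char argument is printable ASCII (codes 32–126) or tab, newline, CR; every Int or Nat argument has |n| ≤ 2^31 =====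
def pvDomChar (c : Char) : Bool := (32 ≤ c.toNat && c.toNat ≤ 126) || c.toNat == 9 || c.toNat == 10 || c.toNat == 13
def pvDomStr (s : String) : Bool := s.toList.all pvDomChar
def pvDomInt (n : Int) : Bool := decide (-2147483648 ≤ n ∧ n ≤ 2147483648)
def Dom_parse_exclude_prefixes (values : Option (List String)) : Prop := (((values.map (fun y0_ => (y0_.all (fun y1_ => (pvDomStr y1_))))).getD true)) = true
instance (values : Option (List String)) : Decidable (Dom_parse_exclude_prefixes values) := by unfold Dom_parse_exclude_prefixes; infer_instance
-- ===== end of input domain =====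

-- B replaces A's split/strip nested loops by a single character-level state machine (token + pending-whitespace accumulator); same cost, different algorithm.


-- ===== PORT A =====
-- raw.split(",") is ported as PySem.Chars.splitOn on the code points (exact: sep ≠ "")
def parse_exclude_prefixes (values : Option (List String)) : List String :=
  match values with
  | none => []
  | some vs =>
    if vs = [] then []
    else
      vs.foldl (fun items raw =>
        ((PySem.Chars.splitOn raw.toList [',']).map String.ofList).foldl
          (fun items part =>
            let cleaned := PySem.Str.strip part
            if cleaned ≠ "" then items ++ [cleaned] else items)
          items) []

-- ===== PORT B =====
-- B's inner loop is a per-character state machine: (items, token, pending);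
-- token/pending are the strings of Source B, carried as List Char (code points).
def pvScanStep (st : List String × List Char × List Char) (ch : Char) :
    List String × List Char × List Char :=
  let (items, token, pending) := st
  if ch = ',' then
    ((if token ≠ [] then items ++ [String.ofList token] else items), [], [])
  else if PySem.Chars.isspace ch then
    (items, token, if token ≠ [] then pending ++ [ch] else pending)
  else
    (items, token ++ pending ++ [ch], [])

def parse_exclude_prefixes_alt (values : Option (List String)) : List String :=
  match values with
  | none => []
  | some vs =>
    if vs = [] then []
    else
      vs.foldl (fun items raw =>
        let r := raw.toList.foldl pvScanStep (items, [], [])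
        if r.2.1 ≠ [] then r.1 ++ [String.ofList r.2.1] else r.1) []

-- ===== PRECONDITION & SPEC =====
def Spec_parse_exclude_prefixes (values : Option (List String)) (out : List String) : Prop := out = parse_exclude_prefixes_alt values
instance (values : Option (List String)) (out : List String) : Decidable (Spec_parse_exclude_prefixes values out) := by unfold Spec_parse_exclude_prefixes; infer_instance

-- ===== CLAIM (what is proved, stated in full; the proofs are below) =====
def Claim_equal_parse_exclude_prefixes : Prop := ∀ (values : Option (List String)), Dom_parse_exclude_prefixes values → Spec_parse_exclude_prefixes values (parse_exclude_prefixes values)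

-- ===== LEMMAS AND PROOFS =====

-- clean characterization of splitting on a single comma
def mySplit : List Char → List (List Char)
  | [] => [[]]
  | c :: rest =>
    if c = ',' then [] :: mySplit rest
    else
      match mySplit rest with
      | [] => [[c]]
      | h :: t => (c :: h) :: t

def consHead (p : List Char) : List (List Char) → List (List Char)
  | [] => [p]
  | h :: t => (p ++ h) :: t

theorem mySplit_ne_nil (l : List Char) : mySplit l ≠ [] := by
  cases l with
  | nil => simp [mySplit]
  | cons c rest =>
    simp only [mySplit]
    split
    · simp
    · split <;> simp

theorem go_eq_mySplit (fuel : Nat) : ∀ (l cur : List Char) (accs : List (List Char)),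
    l.length < fuel →
    PySem.Chars.splitOn.go [','] fuel l cur accs = accs.reverse ++ consHead cur.reverse (mySplit l) := by
  induction fuel with
  | zero => intro l cur accs h; omega
  | succ f ih =>
    intro l cur accs h
    cases l with
    | nil =>
      simp [PySem.Chars.splitOn.go, mySplit, consHead]
    | cons c rest =>
      rw [PySem.Chars.splitOn.go]
      by_cases hc : c = ','
      · subst hc
        have hpre : [','].isPrefixOf (',' :: rest) = true := by
          simp [List.isPrefixOf]
        rw [hpre]
        simp only [if_true, List.length_singleton, List.drop_succ_cons, List.drop_zero]
        rw [ih rest [] (cur.reverse :: accs) (by simpa using Nat.lt_of_succ_lt_succ h)]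
        simp only [mySplit, List.reverse_cons, List.reverse_nil, consHead]
        obtain ⟨h', t', hh⟩ := List.exists_cons_of_ne_nil (mySplit_ne_nil rest)
        simp [hh]
      · have hpre : [','].isPrefixOf (c :: rest) = false := by
          simp only [List.isPrefixOf, Bool.and_eq_false_iff]
          left
          exact decide_eq_false (fun h => hc h.symm)
        rw [hpre]
        simp only [Bool.false_eq_true, if_false]
        rw [ih rest (c :: cur) accs (by simpa using Nat.lt_of_succ_lt_succ h)]
        simp only [mySplit, if_neg hc, List.reverse_cons]
        obtain ⟨h', t', hh⟩ := List.exists_cons_of_ne_nil (mySplit_ne_nil rest)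
        simp [hh, consHead]

theorem splitOn_comma_eq (l : List Char) :
    PySem.Chars.splitOn l [','] = mySplit l := by
  unfold PySem.Chars.splitOn
  rw [go_eq_mySplit (l.length + 1) l [] [] (Nat.lt_succ_self _)]
  obtain ⟨h', t', hh⟩ := List.exists_cons_of_ne_nil (mySplit_ne_nil l)
  simp [hh, consHead]

-- the list of kept (stripped, nonempty) parts
def outFull (parts : List (List Char)) : List String :=
  ((parts.map PySem.Chars.strip).filter (· ≠ [])).map String.ofList

-- A's inner fold over the split parts appends exactly outFull
theorem foldA_eq_outFull (parts : List (List Char)) (items : List String) :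
    (parts.map String.ofList).foldl
      (fun items part =>
        let cleaned := PySem.Str.strip part
        if cleaned ≠ "" then items ++ [cleaned] else items) items
    = items ++ outFull parts := by
  induction parts generalizing items with
  | nil => simp [outFull]
  | cons p rest ih =>
    simp only [List.map_cons, List.foldl_cons, ih]
    by_cases hp : PySem.Chars.strip p = []
    · have : PySem.Str.strip (String.ofList p) = "" := by
        simp [PySem.Str.strip, hp]
      simp [this, outFull, hp]
    · have h1 : PySem.Str.strip (String.ofList p) ≠ "" := by
        simp only [PySem.Str.strip, String.toList_ofList]
        intro h
        exact hp (by simpa using congrArg String.toList h)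
      simp only [PySem.Str.strip, String.toList_ofList] at h1 ⊢
      simp [h1, outFull, hp]

-- whitespace-tail lemmas
theorem rstrip_append_ws (t p : List Char) (hp : p.all PySem.Chars.isspace = true) :
    PySem.Chars.rstrip (t ++ p) = PySem.Chars.rstrip t := by
  unfold PySem.Chars.rstrip
  rw [List.reverse_append, List.dropWhile_append]
  have : List.dropWhile PySem.Chars.isspace p.reverse = [] := by
    rw [List.dropWhile_eq_nil_iff]
    intro x hx
    exact (List.all_eq_true.mp hp) x (List.mem_reverse.mp hx)
  simp [this]

theorem rstrip_last_nonws (t : List Char) (c : Char) (hc : ¬ PySem.Chars.isspace c = true) :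
    PySem.Chars.rstrip (t ++ [c]) = t ++ [c] := by
  unfold PySem.Chars.rstrip
  simp [hc]

theorem strip_cons_ws (c : Char) (h : PySem.Chars.isspace c = true) (l : List Char) :
    PySem.Chars.strip (c :: l) = PySem.Chars.strip l := by
  simp [PySem.Chars.strip, PySem.Chars.lstrip, h]

theorem strip_cons_nonws (c : Char) (h : ¬ PySem.Chars.isspace c = true) (l : List Char) :
    PySem.Chars.strip (c :: l) = PySem.Chars.rstrip (c :: l) := by
  simp [PySem.Chars.strip, PySem.Chars.lstrip, h]

-- the token the scanner ends a comma-free segment with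
def tokAfter (token pending seg : List Char) : List Char :=
  if token = [] then PySem.Chars.strip seg
  else PySem.Chars.rstrip (token ++ pending ++ seg)

def flushB (items : List String) (token : List Char) : List String :=
  if token ≠ [] then items ++ [String.ofList token] else items

-- main invariant of B's state machine
theorem scan_eq (l : List Char) : ∀ (items : List String) (token pending : List Char),
    pending.all PySem.Chars.isspace = true →
    (token = [] → pending = []) →
    PySem.Chars.rstrip token = token →
    (let r := l.foldl pvScanStep (items, token, pending)
     if r.2.1 ≠ [] then r.1 ++ [String.ofList r.2.1] else r.1)
    = flushB items (tokAfter token pending ((mySplit l).headI))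
      ++ outFull ((mySplit l).tail) := by
  induction l with
  | nil =>
    intro items token pending hp htp hr
    have htok : tokAfter token pending [] = token := by
      by_cases ht : token = []
      · simp [tokAfter, ht, PySem.Chars.strip, PySem.Chars.lstrip, PySem.Chars.rstrip]
      · simp only [tokAfter, if_neg ht, List.append_nil]
        rw [rstrip_append_ws _ _ hp, hr]
    simp only [List.foldl_nil, mySplit, List.headI, List.tail, htok]
    unfold flushB outFull
    by_cases ht : token = [] <;> simp [ht]
  | cons c rest ih =>
    intro items token pending hp htp hr
    by_cases hc : c = ','
    · subst hc
      have hstep : pvScanStep (items, token, pending) ','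
          = ((if token ≠ [] then items ++ [String.ofList token] else items), [], []) := by
        simp [pvScanStep]
      simp only [List.foldl_cons, hstep]
      rw [ih _ [] [] (by simp) (fun _ => rfl) (by simp [PySem.Chars.rstrip])]
      have hsplit : mySplit (',' :: rest) = [] :: mySplit rest := by simp [mySplit]
      rw [hsplit]
      obtain ⟨h', t', hh⟩ := List.exists_cons_of_ne_nil (mySplit_ne_nil rest)
      rw [hh]
      simp only [List.headI, List.tail]
      have htok : tokAfter token pending [] = token := by
        by_cases ht : token = []
        · simp [tokAfter, ht, PySem.Chars.strip, PySem.Chars.lstrip, PySem.Chars.rstrip]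
        · simp only [tokAfter, if_neg ht, List.append_nil]
          rw [rstrip_append_ws _ _ hp, hr]
      rw [htok]
      have htA : tokAfter [] [] h' = PySem.Chars.strip h' := by simp [tokAfter]
      rw [htA]
      unfold flushB outFull
      by_cases hs : PySem.Chars.strip h' = [] <;>
        by_cases ht : token = [] <;>
        simp [hs, ht]
    · have hsplit : mySplit (c :: rest) = consHead [c] (mySplit rest) := by
        simp only [mySplit, if_neg hc]
        obtain ⟨h', t', hh⟩ := List.exists_cons_of_ne_nil (mySplit_ne_nil rest)
        simp [hh, consHead]
      obtain ⟨h', t', hh⟩ := List.exists_cons_of_ne_nil (mySplit_ne_nil rest)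
      by_cases hw : PySem.Chars.isspace c = true
      · -- whitespace character
        by_cases ht : token = []
        · have hpnil : pending = [] := htp ht
          subst ht hpnil
          have hstep : pvScanStep (items, [], []) c = (items, [], []) := by
            simp [pvScanStep, hc, hw]
          simp only [List.foldl_cons, hstep]
          rw [ih items [] [] (by simp) (fun _ => rfl) (by simp [PySem.Chars.rstrip])]
          rw [hsplit, hh]
          simp only [consHead, List.headI, List.tail, List.singleton_append]
          rw [tokAfter, tokAfter, if_pos rfl, if_pos rfl, strip_cons_ws c hw]
        · have hstep : pvScanStep (items, token, pending) c = (items, token, pending ++ [c]) := by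
            simp [pvScanStep, hc, hw, ht]
          simp only [List.foldl_cons, hstep]
          rw [ih items token (pending ++ [c]) (by simp_all [List.all_append])
            (fun h => absurd h ht) hr]
          rw [hsplit, hh]
          simp only [consHead, List.headI, List.tail, List.singleton_append]
          rw [tokAfter, tokAfter, if_neg ht, if_neg ht]
          congr 1
          simp
      · -- ordinary character
        have hstep : pvScanStep (items, token, pending) c = (items, token ++ pending ++ [c], []) := by
          simp [pvScanStep, hc, hw]
        simp only [List.foldl_cons, hstep]
        have hne : token ++ pending ++ [c] ≠ [] := by simp
        rw [ih items (token ++ pending ++ [c]) [] (by simp) (fun h => absurd h hne)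
          (rstrip_last_nonws _ _ hw)]
        rw [hsplit, hh]
        simp only [consHead, List.headI, List.tail, List.singleton_append]
        rw [tokAfter, tokAfter, if_neg hne]
        by_cases ht : token = []
        · have hpnil : pending = [] := htp ht
          subst ht hpnil
          simp only [List.nil_append]
          rw [strip_cons_nonws c hw]
          simp
        · rw [if_neg ht]
          congr 1
          simp

-- per-raw: B's scan+flush equals items ++ outFull of the comma split
theorem scanFlush_eq_outFull (l : List Char) (items : List String) :
    (let r := l.foldl pvScanStep (items, [], [])
     if r.2.1 ≠ [] then r.1 ++ [String.ofList r.2.1] else r.1)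
    = items ++ outFull (mySplit l) := by
  rw [scan_eq l items [] [] (by simp) (fun _ => rfl) (by simp [PySem.Chars.rstrip])]
  obtain ⟨h', t', hh⟩ := List.exists_cons_of_ne_nil (mySplit_ne_nil l)
  rw [hh]
  simp only [List.headI, List.tail]
  have htA : tokAfter [] [] h' = PySem.Chars.strip h' := by simp [tokAfter]
  rw [htA]
  unfold flushB outFull
  by_cases hs : PySem.Chars.strip h' = [] <;> simp [hs]

-- pointwise-equal step functions fold alike
theorem pv_foldl_ext {α β : Type} (f g : β → α → β) (l : List α) (init : β)
    (h : ∀ b a, f b a = g b a) : l.foldl f init = l.foldl g init := by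
  induction l generalizing init with
  | nil => rfl
  | cons x rest ih => simp only [List.foldl_cons, h, ih]

-- ===== VERDICT (by name: the statement is the Claim_ definition above) =====
theorem parse_exclude_prefixes_spec : Claim_equal_parse_exclude_prefixes := by
  intro values _
  unfold Spec_parse_exclude_prefixes parse_exclude_prefixes parse_exclude_prefixes_alt
  cases values with
  | none => rfl
  | some vs =>
    by_cases hvs : vs = []
    · simp [hvs]
    · simp only [if_neg hvs]
      apply pv_foldl_ext
      intro items raw
      rw [splitOn_comma_eq, foldA_eq_outFull]
      exact (scanFlush_eq_outFull raw.toList items).symm
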